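-- pv_equiv track=rewrite | github.com/francohilt/lexer_parser | lexer.py | automata_corcheteAbierto
-- ===== SOURCE A (Python) =====
-- RESULTADO_TRAMPA = "TRAMPA"
--
-- RESULTADO_ACEPTADO = "RESULTADO_ACEPTADO"
--
-- RESULTADO_NO_ACEPTADO = "RESULTADO_NO_ACEPTADO"
--
-- ESTADO_TRAMPA = -1
--
-- def automata_corcheteAbierto (cadena):
--     estado = 0
--     final = 1
--
--     for caracter in cadena:
--         if estado == 0 and caracter == '[':
--             estado = 1
--         else:
--             estado = ESTADO_TRAMPA
--             break
--
--     if estado == ESTADO_TRAMPA: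
--         return RESULTADO_TRAMPA
--     elif estado == final:
--         return RESULTADO_ACEPTADO
--     else:
--         return RESULTADO_NO_ACEPTADO
-- ===== SOURCE B (Python) =====
-- RESULTADO_TRAMPA = "TRAMPA"
-- RESULTADO_ACEPTADO = "RESULTADO_ACEPTADO"
-- RESULTADO_NO_ACEPTADO = "RESULTADO_NO_ACEPTADO"
--
-- def automata_corcheteAbierto(cadena):
--     if cadena == '[':
--         return RESULTADO_ACEPTADO
--     elif cadena == '':
--         return RESULTADO_NO_ACEPTADO
--     else:
--         return RESULTADO_TRAMPA
-- ===== Notes on version B (the rewrite author's own statement) =====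
-- stated objective: simpler
-- what changed: Replaced the character-by-character DFA state loop with a closed-form three-way string comparison ('[' accepted, '' not accepted, anything else trap).
import Mathlib
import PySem

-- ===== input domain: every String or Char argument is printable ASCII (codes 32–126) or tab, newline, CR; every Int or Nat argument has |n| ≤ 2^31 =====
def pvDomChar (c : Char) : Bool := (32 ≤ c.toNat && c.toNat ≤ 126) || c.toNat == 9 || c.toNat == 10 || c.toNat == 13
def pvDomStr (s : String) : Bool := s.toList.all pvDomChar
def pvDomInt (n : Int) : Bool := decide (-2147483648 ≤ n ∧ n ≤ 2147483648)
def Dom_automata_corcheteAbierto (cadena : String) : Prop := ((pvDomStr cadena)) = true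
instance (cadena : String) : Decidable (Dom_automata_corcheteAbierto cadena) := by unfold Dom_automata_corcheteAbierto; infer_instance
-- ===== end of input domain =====

-- ===== PORT A =====
-- B replaces A's DFA state loop by a closed-form three-way string comparison (objective: simpler).
-- loop over the characters: state 0 -> 1 on '[', otherwise trap (-1) and break
def pvLoopA : Int → List Char → Int
  | estado, [] => estado
  | estado, c :: rest =>
    if estado == 0 && c == '[' then pvLoopA 1 rest
    else (-1 : Int)  -- break

def automata_corcheteAbierto (cadena : String) : String :=
  let estado := pvLoopA 0 cadena.toList
  let final : Int := 1
  if estado == -1 then "TRAMPA"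
  else if estado == final then "RESULTADO_ACEPTADO"
  else "RESULTADO_NO_ACEPTADO"

-- ===== PORT B =====
def automata_corcheteAbierto_alt (cadena : String) : String :=
  if cadena == "[" then "RESULTADO_ACEPTADO"
  else if cadena == "" then "RESULTADO_NO_ACEPTADO"
  else "TRAMPA"

-- ===== PRECONDITION & SPEC =====
def Spec_automata_corcheteAbierto (cadena : String) (out : String) : Prop := out = automata_corcheteAbierto_alt cadena
instance (cadena : String) (out : String) : Decidable (Spec_automata_corcheteAbierto cadena out) := by unfold Spec_automata_corcheteAbierto; infer_instance

-- ===== CLAIM (what is proved, stated in full; the proofs are below) =====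
def Claim_equal_automata_corcheteAbierto : Prop := ∀ (cadena : String), Dom_automata_corcheteAbierto cadena → Spec_automata_corcheteAbierto cadena (automata_corcheteAbierto cadena)

-- ===== LEMMAS AND PROOFS =====

-- ===== VERDICT (by name: the statement is the Claim_ definition above) =====
theorem string_eq_iff_toList (s t : String) : (s = t) ↔ s.toList = t.toList :=
  ⟨fun h => h ▸ rfl, fun h => String.ext (by simpa [String.toList] using h)⟩

theorem automata_corcheteAbierto_spec : Claim_equal_automata_corcheteAbierto := by
  intro cadena _
  unfold Spec_automata_corcheteAbierto automata_corcheteAbierto automata_corcheteAbierto_alt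
  match h : cadena.toList with
  | [] => simp [pvLoopA, h, beq_iff_eq, string_eq_iff_toList]
  | c :: rest =>
    by_cases hc : c = '['
    · subst hc
      match rest with
      | [] => simp [pvLoopA, h, beq_iff_eq, string_eq_iff_toList]
      | d :: rest2 => simp [pvLoopA, h, beq_iff_eq, string_eq_iff_toList]
    · simp [pvLoopA, h, hc, beq_iff_eq, string_eq_iff_toList]
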